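-- pv_equiv track=rewrite | github.com/lenafiedor/advent-of-code-25 | day-11/task_2.py | detect_cycle_in_subgraph
-- ===== SOURCE A (Python) =====
-- def detect_cycle_in_subgraph(graph, nodes_subset):
--     """Cycle detection in induced subgraph."""
--     WHITE, GRAY, BLACK = 0, 1, 2
--     color = {u: WHITE for u in nodes_subset}
--
--     def dfs(u):
--         color[u] = GRAY
--         for v in graph.get(u, []):
--             if v not in nodes_subset:
--                 continue
--             if color[v] == GRAY:
--                 return True
--             if color[v] == WHITE and dfs(v):
--                 return True
--         color[u] = BLACK
--         return False
--
--     for u in nodes_subset: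
--         if color[u] == WHITE:
--             if dfs(u):
--                 return True
--     return False
-- ===== SOURCE B (Python) =====
-- def detect_cycle_in_subgraph(graph, nodes_subset):
--     """Cycle detection in induced subgraph — iterative three-color DFS with an explicit stack."""
--     WHITE, GRAY, BLACK = 0, 1, 2
--     color = {u: WHITE for u in nodes_subset}
--
--     for start in nodes_subset:
--         if color[start] != WHITE:
--             continue
--         color[start] = GRAY
--         stack = [(start, graph.get(start, []))]
--         while stack:
--             u, rest = stack[-1]
--             if not rest:
--                 stack.pop()
--                 color[u] = BLACK
--                 continue
--             v, rest = rest[0], rest[1:]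
--             stack[-1] = (u, rest)
--             if v not in nodes_subset:
--                 continue
--             if color[v] == GRAY:
--                 return True
--             if color[v] == WHITE:
--                 color[v] = GRAY
--                 stack.append((v, graph.get(v, [])))
--     return False
-- ===== Notes on version B (the rewrite author's own statement) =====
-- stated objective: alternative
-- what changed: A's recursive three-color DFS is replaced by an iterative DFS that keeps an explicit stack of (node, remaining-neighbours) frames, marking a node BLACK when its frame is exhausted instead of on return from recursion.
import Mathlib
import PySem

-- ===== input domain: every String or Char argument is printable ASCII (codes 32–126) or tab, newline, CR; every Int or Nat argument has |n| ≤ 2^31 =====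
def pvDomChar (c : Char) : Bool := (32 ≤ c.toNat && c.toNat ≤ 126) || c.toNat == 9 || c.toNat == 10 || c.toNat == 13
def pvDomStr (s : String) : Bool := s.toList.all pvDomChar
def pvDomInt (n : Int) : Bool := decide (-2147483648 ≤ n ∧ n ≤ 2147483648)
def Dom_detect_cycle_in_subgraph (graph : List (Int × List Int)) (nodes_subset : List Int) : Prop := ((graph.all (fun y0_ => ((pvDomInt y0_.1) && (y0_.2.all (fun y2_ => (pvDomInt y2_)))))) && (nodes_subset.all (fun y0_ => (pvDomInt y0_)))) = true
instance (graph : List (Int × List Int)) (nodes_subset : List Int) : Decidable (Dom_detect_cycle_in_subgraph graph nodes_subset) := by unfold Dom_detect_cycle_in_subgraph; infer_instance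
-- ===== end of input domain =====

-- B replaces A's recursive three-color DFS by an iterative DFS with an explicit stack of
-- (node, remaining-neighbours) frames (objective: alternative decomposition; same values everywhere).

-- ===== PORT A =====
-- graph.get(u, []) (shared by both Pythons verbatim)
def pvNbrs (graph : List (Int × List Int)) (u : Int) : List Int :=
  (PySem.Dict.mk graph).getD u []

-- {u: WHITE for u in nodes_subset} (shared by both Pythons verbatim); WHITE=0, GRAY=1, BLACK=2
def pvInitColor (nodes_subset : List Int) : PySem.Dict Int Int :=
  nodes_subset.foldl (fun d u => d.insert u 0) PySem.Dict.empty

-- A's recursive dfs(u): the fuel only makes the recursion structural; nesting depth is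
-- bounded by the number of WHITE keys, so fuel (nodes_subset.length + 1) never runs out.
mutual
def pvDfsA (g : List (Int × List Int)) (ns : List Int) :
    Nat → Int → PySem.Dict Int Int → Bool × PySem.Dict Int Int
  | 0, _, c => (false, c)
  | f + 1, u, c => pvGoA g ns f (pvNbrs g u) u (c.insert u 1)
termination_by f u c => (f, 0)

-- the 'for v in graph.get(u, [])' loop body of dfs, over the remaining neighbours
def pvGoA (g : List (Int × List Int)) (ns : List Int) :
    Nat → List Int → Int → PySem.Dict Int Int → Bool × PySem.Dict Int Int
  | _, [], u, c => (false, c.insert u 2)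
  | f, v :: vs, u, c =>
    if v ∈ ns then
      if c.get? v = some 1 then (true, c)
      else if c.get? v = some 0 then
        match pvDfsA g ns f v c with
        | (true, c') => (true, c')
        | (false, c') => pvGoA g ns f vs u c'
      else pvGoA g ns f vs u c
    else pvGoA g ns f vs u c
termination_by f vs u c => (f, vs.length + 1)
end

-- the outer 'for u in nodes_subset' loop
def pvOuterA (g : List (Int × List Int)) (ns : List Int) (f : Nat) :
    List Int → PySem.Dict Int Int → Bool
  | [], _ => false
  | u :: us, c =>
    if c.get? u = some 0 then
      match pvDfsA g ns f u c with
      | (true, _) => true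
      | (false, c') => pvOuterA g ns f us c'
    else pvOuterA g ns f us c

def detect_cycle_in_subgraph (graph : List (Int × List Int)) (nodes_subset : List Int) : Bool :=
  pvOuterA graph nodes_subset (nodes_subset.length + 1) nodes_subset (pvInitColor nodes_subset)

-- ===== PORT B =====
-- B's 'while stack' loop; a frame is (node, remaining neighbours). The fuel only makes the
-- loop structural: every iteration strictly decreases stack work + WHITE count, so the fuel
-- chosen in detect_cycle_in_subgraph_alt never runs out.
def pvRunB (g : List (Int × List Int)) (ns : List Int) :
    Nat → List (Int × List Int) → PySem.Dict Int Int → Bool × PySem.Dict Int Int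
  | 0, _, c => (false, c)
  | _ + 1, [], c => (false, c)
  | f + 1, (u, []) :: rest, c => pvRunB g ns f rest (c.insert u 2)
  | f + 1, (u, v :: vs) :: rest, c =>
    if v ∈ ns then
      if c.get? v = some 1 then (true, c)
      else if c.get? v = some 0 then
        pvRunB g ns f ((v, pvNbrs g v) :: (u, vs) :: rest) (c.insert v 1)
      else pvRunB g ns f ((u, vs) :: rest) c
    else pvRunB g ns f ((u, vs) :: rest) c

-- B's outer 'for start in nodes_subset' loop
def pvOuterB (g : List (Int × List Int)) (ns : List Int) (f : Nat) :
    List Int → PySem.Dict Int Int → Bool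
  | [], _ => false
  | u :: us, c =>
    if c.get? u = some 0 then
      match pvRunB g ns f [(u, pvNbrs g u)] (c.insert u 1) with
      | (true, _) => true
      | (false, c') => pvOuterB g ns f us c'
    else pvOuterB g ns f us c

def detect_cycle_in_subgraph_alt (graph : List (Int × List Int)) (nodes_subset : List Int) : Bool :=
  pvOuterB graph nodes_subset
    ((nodes_subset.length + 1) * (graph.foldl (fun a p => a + p.2.length) 0 + 2))
    nodes_subset (pvInitColor nodes_subset)

-- ===== PRECONDITION & SPEC =====
def Spec_detect_cycle_in_subgraph (graph : List (Int × List Int)) (nodes_subset : List Int) (out : Bool) : Prop := out = detect_cycle_in_subgraph_alt graph nodes_subset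
instance (graph : List (Int × List Int)) (nodes_subset : List Int) (out : Bool) : Decidable (Spec_detect_cycle_in_subgraph graph nodes_subset out) := by unfold Spec_detect_cycle_in_subgraph; infer_instance

-- ===== CLAIM (what is proved, stated in full; the proofs are below) =====
def Claim_equal_detect_cycle_in_subgraph : Prop := ∀ (graph : List (Int × List Int)) (nodes_subset : List Int), Dom_detect_cycle_in_subgraph graph nodes_subset → Spec_detect_cycle_in_subgraph graph nodes_subset (detect_cycle_in_subgraph graph nodes_subset)

-- ===== LEMMAS AND PROOFS =====

-- whiteCount: the number of WHITE entries of the colour dict (the termination measure)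
def pvW (c : PySem.Dict Int Int) : Nat := c.items.countP (fun p => p.2 == 0)

-- total number of neighbour entries of the graph (bounds every pvNbrs)
def pvS (g : List (Int × List Int)) : Nat := (g.map (fun p => p.2.length)).sum

def pvStackCost : List (Int × List Int) → Nat
  | [] => 0
  | (_, vs) :: rest => vs.length + 1 + pvStackCost rest

-- an upper bound on the number of steps pvRunB still takes from a given state
def pvCost (g : List (Int × List Int)) (st : List (Int × List Int)) (c : PySem.Dict Int Int) : Nat :=
  pvStackCost st + pvW c * (pvS g + 2)

lemma pv_countP_replace_le (l : List (Int × Int)) (u k : Int) (hk : (k == 0) = false) :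
    (l.map (fun p => if p.1 == u then (u, k) else p)).countP (fun p => p.2 == 0)
      ≤ l.countP (fun p => p.2 == 0) := by
  induction l with
  | nil => simp
  | cons p l ih =>
    simp only [List.map_cons, List.countP_cons]
    by_cases h : (p.1 == u) = true
    · rw [if_pos h]
      apply Nat.add_le_add ih
      simp [hk]
    · rw [if_neg h]
      exact Nat.add_le_add ih le_rfl

lemma pv_countP_replace_lt (l : List (Int × Int)) (v : Int) (h : (v, (0:Int)) ∈ l) :
    (l.map (fun p => if p.1 == v then (v, 1) else p)).countP (fun p => p.2 == 0)
      < l.countP (fun p => p.2 == 0) := by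
  induction l with
  | nil => simp at h
  | cons p l ih =>
    simp only [List.map_cons, List.countP_cons]
    rcases List.mem_cons.1 h with h0 | h0
    · subst h0
      have hle := pv_countP_replace_le l v 1 (by decide)
      rw [if_pos (by simp : (((v:Int),(0:Int)).1 == v) = true)]
      have h2 : (if (((v:Int),(1:Int)).2 == (0:Int)) = true then 1 else 0) = 0 := by simp
      have h3 : (if (((v:Int),(0:Int)).2 == (0:Int)) = true then 1 else 0) = 1 := by simp
      rw [h2, h3]
      omega
    · have ihh := ih h0
      by_cases hp : (p.1 == v) = true
      · rw [if_pos hp]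
        have h2 : (if (((v:Int),(1:Int)).2 == (0:Int)) = true then 1 else 0) = 0 := by simp
        rw [h2]
        split_ifs <;> omega
      · rw [if_neg hp]
        exact Nat.add_lt_add_of_lt_of_le ihh le_rfl

lemma pvW_insert_le (c : PySem.Dict Int Int) (u k : Int) (hk : (k == 0) = false) :
    pvW (c.insert u k) ≤ pvW c := by
  unfold pvW
  rw [PySem.Dict.items_insert]
  split_ifs with hc
  · exact pv_countP_replace_le _ _ _ hk
  · simp [List.countP_append, hk]

lemma pvW_insert_lt (c : PySem.Dict Int Int) (v : Int) (h : c.get? v = some 0) :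
    pvW (c.insert v 1) < pvW c := by
  have hm : (v, (0:Int)) ∈ c.items := PySem.Dict.mem_items_of_get?_eq_some c h
  have hc : c.contains v = true := by rw [PySem.Dict.contains_eq_isSome_get?, h]; rfl
  unfold pvW
  rw [PySem.Dict.items_insert]
  simp only [hc, if_true]
  exact pv_countP_replace_lt _ _ hm

lemma pvW_pos (c : PySem.Dict Int Int) (v : Int) (h : c.get? v = some 0) : 0 < pvW c := by
  have hm : (v, (0:Int)) ∈ c.items := PySem.Dict.mem_items_of_get?_eq_some c h
  unfold pvW
  rw [List.countP_pos_iff]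
  exact ⟨_, hm, by simp⟩

lemma pv_size_insert_le (c : PySem.Dict Int Int) (u k : Int) :
    (c.insert u k).items.length ≤ c.items.length + 1 := by
  rw [PySem.Dict.items_insert]; split_ifs <;> simp

lemma pvW_le_size (c : PySem.Dict Int Int) : pvW c ≤ c.items.length :=
  List.countP_le_length ..

lemma pv_foldl_insert_size (ns : List Int) : ∀ d : PySem.Dict Int Int,
    ((ns.foldl (fun d u => d.insert u 0) d)).items.length ≤ d.items.length + ns.length := by
  induction ns with
  | nil => simp
  | cons u us ih =>
    intro d
    simp only [List.foldl_cons, List.length_cons]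
    have h1 := ih (d.insert u 0)
    have h2 := pv_size_insert_le d u 0
    omega

lemma pvW_init (ns : List Int) : pvW (pvInitColor ns) ≤ ns.length := by
  have h1 := pvW_le_size (pvInitColor ns)
  have h2 := pv_foldl_insert_size ns PySem.Dict.empty
  have h3 : (PySem.Dict.empty : PySem.Dict Int Int).items = [] := rfl
  rw [h3] at h2
  simp only [pvInitColor] at h1
  simp only [pvInitColor, List.length_nil] at *
  omega

lemma pv_get?_len (g : List (Int × List Int)) : ∀ u : Int,
    ((((PySem.Dict.mk g).get? u)).getD []).length ≤ pvS g := by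
  induction g with
  | nil =>
    intro u
    simp [show ∀ u:Int, (PySem.Dict.mk ([]:List (Int × List Int))).get? u = none from fun _ => rfl]
  | cons p g ih =>
    intro u
    rw [PySem.Dict.get?_mk_cons]
    by_cases h : (p.1 == u) = true
    · rw [if_pos h]
      simp [pvS]
    · rw [if_neg h]
      have := ih u
      simp only [pvS, List.map_cons, List.sum_cons] at *
      omega

lemma pvNbrs_len (g : List (Int × List Int)) (u : Int) : (pvNbrs g u).length ≤ pvS g := by
  have := pv_get?_len g u
  simpa [pvNbrs, PySem.Dict.getD_eq_get?_getD] using this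

lemma pvS_foldl (g : List (Int × List Int)) : ∀ n : Nat,
    g.foldl (fun a p => a + p.2.length) n = n + pvS g := by
  induction g with
  | nil => intro n; simp [pvS]
  | cons p g ih =>
    intro n
    simp only [List.foldl_cons, ih, pvS, List.map_cons, List.sum_cons]
    omega

lemma pvRunB_nil (g : List (Int × List Int)) (ns : List Int) (f : Nat) (c : PySem.Dict Int Int) :
    pvRunB g ns f [] c = (false, c) := by
  cases f <;> rfl

-- pvGoA never increases the WHITE count (given enough fuel)
lemma pvGoA_W_mono (g : List (Int × List Int)) (ns : List Int) :
    ∀ (n : Nat) (c : PySem.Dict Int Int), pvW c ≤ n →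
    ∀ (f : Nat) (vs : List Int) (u : Int), pvW c ≤ f →
    pvW (pvGoA g ns f vs u c).2 ≤ pvW c := by
  intro n
  induction n using Nat.strong_induction_on with
  | _ n IH =>
  intro c hcn f vs u hcf
  induction vs with
  | nil =>
    rw [pvGoA]
    exact pvW_insert_le c u 2 (by decide)
  | cons v vs ihv =>
    rw [pvGoA]
    by_cases hv : v ∈ ns
    · rw [if_pos hv]
      by_cases h1 : c.get? v = some 1
      · rw [if_pos h1]
      · rw [if_neg h1]
        by_cases h0 : c.get? v = some 0
        · rw [if_pos h0]
          have hpos := pvW_pos c v h0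
          obtain ⟨f', rfl⟩ : ∃ f', f = f' + 1 := ⟨f - 1, by omega⟩
          rw [pvDfsA]
          have hlt := pvW_insert_lt c v h0
          have hmono := IH (pvW (c.insert v 1)) (by omega) (c.insert v 1) le_rfl f' (pvNbrs g v) v (by omega)
          rcases hr : pvGoA g ns f' (pvNbrs g v) v (c.insert v 1) with ⟨b, c'⟩
          rw [hr] at hmono
          simp only at hmono
          cases b
          · simp only
            have h2 := IH (pvW c') (by omega) c' le_rfl (f' + 1) vs u (by omega)
            omega
          · simpa using by omega
        · rw [if_neg h0]; exact ihv
    · rw [if_neg hv]; exact ihv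

-- pvRunB's value does not depend on the fuel, once the fuel covers pvCost
lemma pvRunB_irrel (g : List (Int × List Int)) (ns : List Int) :
    ∀ (n : Nat) (st : List (Int × List Int)) (c : PySem.Dict Int Int) (f1 f2 : Nat),
    pvCost g st c ≤ n → pvCost g st c ≤ f1 → pvCost g st c ≤ f2 →
    pvRunB g ns f1 st c = pvRunB g ns f2 st c := by
  intro n
  induction n using Nat.strong_induction_on with
  | _ n IH =>
  intro st c f1 f2 hn h1 h2
  cases st with
  | nil => rw [pvRunB_nil, pvRunB_nil]
  | cons fr rest =>
    rcases fr with ⟨u, vs⟩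
    have hsc : 1 ≤ pvCost g ((u,vs)::rest) c := by
      simp only [pvCost, pvStackCost]; omega
    obtain ⟨a, rfl⟩ : ∃ a, f1 = a + 1 := ⟨f1 - 1, by omega⟩
    obtain ⟨b, rfl⟩ : ∃ b, f2 = b + 1 := ⟨f2 - 1, by omega⟩
    cases vs with
    | nil =>
      simp only [pvRunB]
      have hW := pvW_insert_le c u 2 (by decide)
      have hmul := Nat.mul_le_mul_right (pvS g + 2) hW
      have hc' : pvCost g rest (c.insert u 2) + 1 ≤ pvCost g ((u,([]:List Int)) :: rest) c := by
        simp only [pvCost, pvStackCost, List.length_nil]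
        omega
      exact IH (n-1) (by omega) _ _ a b (by omega) (by omega) (by omega)
    | cons v vs =>
      simp only [pvRunB]
      have hstep : pvCost g ((u,vs)::rest) c + 1 = pvCost g ((u,v::vs)::rest) c := by
        simp only [pvCost, pvStackCost, List.length_cons]
        omega
      by_cases hv : v ∈ ns
      · simp only [if_pos hv]
        by_cases hg : c.get? v = some 1
        · simp only [if_pos hg]
        · simp only [if_neg hg]
          by_cases h0 : c.get? v = some 0
          · simp only [if_pos h0]
            have hlt := pvW_insert_lt c v h0
            have hnb := pvNbrs_len g v
            have hKm := Nat.mul_le_mul_right (pvS g + 2)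
              (show pvW (c.insert v 1) + 1 ≤ pvW c by omega)
            rw [add_mul, one_mul] at hKm
            have hc' : pvCost g ((v, pvNbrs g v) :: (u,vs) :: rest) (c.insert v 1) + 2
                ≤ pvCost g ((u,v::vs)::rest) c := by
              simp only [pvCost, pvStackCost, List.length_cons]
              omega
            exact IH (n-1) (by omega) _ _ a b (by omega) (by omega) (by omega)
          · simp only [if_neg h0]
            exact IH (n-1) (by omega) _ _ a b (by omega) (by omega) (by omega)
      · simp only [if_neg hv]
        exact IH (n-1) (by omega) _ _ a b (by omega) (by omega) (by omega)

-- the simulation: one B stack frame behaves as A's neighbour loop followed by the rest of the stack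
lemma pvSim (g : List (Int × List Int)) (ns : List Int) :
    ∀ (n : Nat) (c : PySem.Dict Int Int), pvW c ≤ n →
    ∀ (vs : List Int) (u : Int) (rest : List (Int × List Int)) (fA fB : Nat),
    pvW c ≤ fA → pvCost g ((u, vs) :: rest) c ≤ fB →
    pvRunB g ns fB ((u, vs) :: rest) c =
      (match pvGoA g ns fA vs u c with
       | (true, c') => (true, c')
       | (false, c') => pvRunB g ns fB rest c') := by
  intro n
  induction n using Nat.strong_induction_on with
  | _ n IH =>
  intro c hcn vs
  induction vs with
  | nil =>
    intro u rest fA fB hfa hfb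
    have hsc : 1 ≤ pvCost g ((u,([]:List Int))::rest) c := by
      simp only [pvCost, pvStackCost]; omega
    obtain ⟨b, rfl⟩ : ∃ b, fB = b + 1 := ⟨fB - 1, by omega⟩
    simp only [pvRunB]
    rw [pvGoA]
    simp only
    have hW := pvW_insert_le c u 2 (by decide)
    have hmul := Nat.mul_le_mul_right (pvS g + 2) hW
    have hc' : pvCost g rest (c.insert u 2) + 1 ≤ pvCost g ((u,([]:List Int))::rest) c := by
      simp only [pvCost, pvStackCost, List.length_nil]
      omega
    exact pvRunB_irrel g ns (pvCost g rest (c.insert u 2)) rest (c.insert u 2) b (b+1)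
      le_rfl (by omega) (by omega)
  | cons v vs ihv =>
    intro u rest fA fB hfa hfb
    have hsc : 1 ≤ pvCost g ((u,v::vs)::rest) c := by
      simp only [pvCost, pvStackCost]; omega
    obtain ⟨b, rfl⟩ : ∃ b, fB = b + 1 := ⟨fB - 1, by omega⟩
    have hstep : pvCost g ((u,vs)::rest) c + 1 = pvCost g ((u,v::vs)::rest) c := by
      simp only [pvCost, pvStackCost, List.length_cons]
      omega
    simp only [pvRunB]
    rw [pvGoA]
    by_cases hv : v ∈ ns
    · simp only [if_pos hv]
      by_cases h1 : c.get? v = some 1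
      · simp only [if_pos h1]
      · simp only [if_neg h1]
        by_cases h0 : c.get? v = some 0
        · simp only [if_pos h0]
          have hpos := pvW_pos c v h0
          have hlt := pvW_insert_lt c v h0
          obtain ⟨fa, rfl⟩ : ∃ fa, fA = fa + 1 := ⟨fA - 1, by omega⟩
          rw [pvDfsA]
          have hnb := pvNbrs_len g v
          have hKm := Nat.mul_le_mul_right (pvS g + 2)
            (show pvW (c.insert v 1) + 1 ≤ pvW c by omega)
          rw [add_mul, one_mul] at hKm
          have hc' : pvCost g ((v, pvNbrs g v) :: (u,vs) :: rest) (c.insert v 1) + 2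
              ≤ pvCost g ((u,v::vs)::rest) c := by
            simp only [pvCost, pvStackCost, List.length_cons]
            omega
          rw [pvRunB_irrel g ns (pvCost g ((v, pvNbrs g v) :: (u,vs) :: rest) (c.insert v 1))
            ((v, pvNbrs g v) :: (u,vs) :: rest) (c.insert v 1) b (b+1) le_rfl (by omega) (by omega)]
          rw [IH (pvW (c.insert v 1)) (by omega) (c.insert v 1) le_rfl (pvNbrs g v) v
            ((u,vs)::rest) fa (b+1) (by omega) (by omega)]
          rcases hr : pvGoA g ns fa (pvNbrs g v) v (c.insert v 1) with ⟨bb, c'⟩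
          have hW' := pvGoA_W_mono g ns (pvW (c.insert v 1)) (c.insert v 1) le_rfl fa
            (pvNbrs g v) v (by omega)
          rw [hr] at hW'
          simp only at hW'
          cases bb
          · simp only
            have hcost' : pvCost g ((u,vs)::rest) c' ≤ b + 1 := by
              have hm := Nat.mul_le_mul_right (pvS g + 2)
                (show pvW c' ≤ pvW c by omega)
              simp only [pvCost, pvStackCost, List.length_cons] at *
              omega
            rw [IH (pvW c') (by omega) c' le_rfl vs u rest (fa+1) (b+1) (by omega) hcost']
          · simp only
        · simp only [if_neg h0]
          rw [pvRunB_irrel g ns (pvCost g ((u,vs)::rest) c) ((u,vs)::rest) c b (b+1)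
            le_rfl (by omega) (by omega)]
          exact ihv u rest fA (b+1) hfa (by omega)
    · simp only [if_neg hv]
      rw [pvRunB_irrel g ns (pvCost g ((u,vs)::rest) c) ((u,vs)::rest) c b (b+1)
        le_rfl (by omega) (by omega)]
      exact ihv u rest fA (b+1) hfa (by omega)

-- the two outer loops agree
lemma pvOuter_eq (g : List (Int × List Int)) (ns : List Int) :
    ∀ (us : List Int) (c : PySem.Dict Int Int) (fA fB : Nat),
    pvW c < fA → (pvW c + 1) * (pvS g + 2) ≤ fB →
    pvOuterA g ns fA us c = pvOuterB g ns fB us c := by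
  intro us
  induction us with
  | nil => intro c fA fB _ _; rfl
  | cons u us ih =>
    intro c fA fB hA hB
    simp only [pvOuterA, pvOuterB]
    by_cases h0 : c.get? u = some 0
    · simp only [if_pos h0]
      have hpos := pvW_pos c u h0
      have hlt := pvW_insert_lt c u h0
      obtain ⟨fa, rfl⟩ : ∃ fa, fA = fa + 1 := ⟨fA - 1, by omega⟩
      rw [pvDfsA]
      have hnb := pvNbrs_len g u
      have hKm := Nat.mul_le_mul_right (pvS g + 2)
        (show pvW (c.insert u 1) + 1 ≤ pvW c by omega)
      rw [add_mul, one_mul] at hKm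
      have hB2 := hB
      rw [add_mul, one_mul] at hB2
      have hcost : pvCost g [(u, pvNbrs g u)] (c.insert u 1) ≤ fB := by
        simp only [pvCost, pvStackCost]
        omega
      rw [pvSim g ns (pvW (c.insert u 1)) (c.insert u 1) le_rfl (pvNbrs g u) u [] fa fB
        (by omega) hcost]
      rcases hr : pvGoA g ns fa (pvNbrs g u) u (c.insert u 1) with ⟨bb, c'⟩
      have hW' := pvGoA_W_mono g ns (pvW (c.insert u 1)) (c.insert u 1) le_rfl fa
        (pvNbrs g u) u (by omega)
      rw [hr] at hW'
      simp only at hW'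
      cases bb
      · simp only [pvRunB_nil]
        apply ih c' (fa+1) fB (by omega)
        calc (pvW c' + 1) * (pvS g + 2) ≤ (pvW c + 1) * (pvS g + 2) :=
              Nat.mul_le_mul_right _ (by omega)
          _ ≤ fB := hB
      · simp only
    · simp only [if_neg h0]
      exact ih c fA fB hA hB

-- ===== VERDICT (by name: the statement is the Claim_ definition above) =====
theorem detect_cycle_in_subgraph_spec : Claim_equal_detect_cycle_in_subgraph := by
  unfold Claim_equal_detect_cycle_in_subgraph
  intro g ns _
  unfold Spec_detect_cycle_in_subgraph detect_cycle_in_subgraph detect_cycle_in_subgraph_alt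
  rw [pvS_foldl]
  simp only [Nat.zero_add]
  apply pvOuter_eq
  · have := pvW_init ns; omega
  · have h := pvW_init ns
    have := Nat.mul_le_mul_right (pvS g + 2)
      (show pvW (pvInitColor ns) + 1 ≤ ns.length + 1 by omega)
    omega
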